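-- pv_equiv track=rewrite | github.com/bsinghbharats/project_cyf_ai_recipe_generator | recipe_generator/rasa/generator.py | _matches_dietary
-- ===== SOURCE A (Python) =====
-- def _matches_dietary(recipe, restrictions):
--     # Simple check - in a real app you'd want more sophisticated checks
--     ingredients_text = ' '.join(recipe['Cleaned_Ingredients']).lower()
--     for restriction in restrictions:
--         if restriction.lower() == 'vegetarian':
--             non_veg = ['meat', 'chicken', 'beef', 'pork', 'fish']
--             if any(ing in ingredients_text for ing in non_veg):
--                 return False
--         elif restriction.lower() == 'vegan':
--             non_vegan = ['meat', 'chicken', 'beef', 'pork', 'fish', 'dairy', 'milk', 'cheese', 'egg']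
--             if any(ing in ingredients_text for ing in non_vegan):
--                 return False
--     return True
-- ===== SOURCE B (Python) =====
-- VEG_FORBIDDEN = ['meat', 'chicken', 'beef', 'pork', 'fish']
-- VEGAN_EXTRA = ['dairy', 'milk', 'cheese', 'egg']
--
--
-- def _matches_dietary(recipe, restrictions):
--     # Pick the single strictest applicable rule (vegan > vegetarian > none),
--     # then test each ingredient on its own: no joined ingredients text is built.
--     ingredients = recipe['Cleaned_Ingredients']
--     lowered = [r.lower() for r in restrictions]
--     if 'vegan' in lowered:
--         forbidden = VEG_FORBIDDEN + VEGAN_EXTRA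
--     elif 'vegetarian' in lowered:
--         forbidden = VEG_FORBIDDEN
--     else:
--         return True
--     return all(
--         all(kw not in ing.lower() for kw in forbidden)
--         for ing in ingredients
--     )
-- ===== Notes on version B (the rewrite author's own statement) =====
-- stated objective: alternative
-- what changed: B never builds A's joined ingredients text: it first reduces the restrictions to the single strictest applicable rule (vegan > vegetarian > none, with an early True when none applies) and then checks every ingredient string individually against that one keyword list, which is equivalent because the keywords contain no space and so cannot straddle A's ' '-join boundaries.
import Mathlib
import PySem

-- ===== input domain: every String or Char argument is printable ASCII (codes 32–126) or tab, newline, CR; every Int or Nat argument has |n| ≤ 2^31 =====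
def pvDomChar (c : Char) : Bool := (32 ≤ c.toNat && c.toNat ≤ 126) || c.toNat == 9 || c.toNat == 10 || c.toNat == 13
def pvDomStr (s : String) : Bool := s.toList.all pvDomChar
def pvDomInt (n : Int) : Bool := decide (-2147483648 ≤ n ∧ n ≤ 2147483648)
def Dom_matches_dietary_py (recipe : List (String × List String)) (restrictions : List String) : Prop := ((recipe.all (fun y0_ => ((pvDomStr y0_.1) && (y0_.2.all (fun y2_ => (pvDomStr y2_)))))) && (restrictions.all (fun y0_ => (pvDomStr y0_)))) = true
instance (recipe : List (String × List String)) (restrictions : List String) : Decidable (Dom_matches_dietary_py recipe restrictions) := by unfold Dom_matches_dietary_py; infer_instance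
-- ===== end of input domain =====

-- B picks the single strictest applicable rule (vegan > vegetarian > none) and then tests
-- each ingredient string on its own, instead of A's per-restriction scans over one joined text.

-- ===== PORT A =====
def pvNonVeg : List String := ["meat", "chicken", "beef", "pork", "fish"]
def pvNonVegan : List String := ["meat", "chicken", "beef", "pork", "fish", "dairy", "milk", "cheese", "egg"]

-- the 'for restriction in restrictions' loop with its early returns
def pvLoopA (text : String) : List String → Bool
  | [] => true
  | r :: rest =>
    if PySem.Str.lower r == "vegetarian" then
      if pvNonVeg.any (fun ing => PySem.Str.isIn ing text) then false else pvLoopA text rest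
    else if PySem.Str.lower r == "vegan" then
      if pvNonVegan.any (fun ing => PySem.Str.isIn ing text) then false else pvLoopA text rest
    else pvLoopA text rest

def matches_dietary_py (recipe : List (String × List String)) (restrictions : List String) : Bool :=
  let ingredients_text := PySem.Str.lower (PySem.Str.join " " ((PySem.Dict.get? ⟨recipe⟩ "Cleaned_Ingredients").getD []))
  pvLoopA ingredients_text restrictions

-- ===== PORT B =====
def pvVeganExtra : List String := ["dairy", "milk", "cheese", "egg"]

-- 'all(all(kw not in ing.lower() for kw in forbidden) for ing in ingredients)'
def pvCheckEach (forbidden : List String) (ingredients : List String) : Bool :=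
  ingredients.all (fun ing => forbidden.all (fun kw => ! PySem.Str.isIn kw (PySem.Str.lower ing)))

def matches_dietary_py_alt (recipe : List (String × List String)) (restrictions : List String) : Bool :=
  let ingredients := (PySem.Dict.get? ⟨recipe⟩ "Cleaned_Ingredients").getD []
  let lowered := restrictions.map PySem.Str.lower
  if lowered.contains "vegan" then pvCheckEach (pvNonVeg ++ pvVeganExtra) ingredients
  else if lowered.contains "vegetarian" then pvCheckEach pvNonVeg ingredients
  else true

-- ===== PRECONDITION & SPEC =====
-- Pre_ excludes exactly the inputs where A raises KeyError: recipes without a 'Cleaned_Ingredients' key.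
def Pre_matches_dietary_py (recipe : List (String × List String)) (restrictions : List String) : Prop :=
  "Cleaned_Ingredients" ∈ recipe.map Prod.fst
instance (recipe : List (String × List String)) (restrictions : List String) : Decidable (Pre_matches_dietary_py recipe restrictions) := by unfold Pre_matches_dietary_py; infer_instance

def pvWitness_matches_dietary_py : (List (String × List String)) × List String :=
  ([("Cleaned_Ingredients", ["tofu", "rice"])], ["vegetarian"])

def Spec_matches_dietary_py (recipe : List (String × List String)) (restrictions : List String) (out : Bool) : Prop := out = matches_dietary_py_alt recipe restrictions
instance (recipe : List (String × List String)) (restrictions : List String) (out : Bool) : Decidable (Spec_matches_dietary_py recipe restrictions out) := by unfold Spec_matches_dietary_py; infer_instance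

-- ===== CLAIM (what is proved, stated in full; the proofs are below) =====
def Claim_equal_matches_dietary_py : Prop := ∀ (recipe : List (String × List String)) (restrictions : List String), Dom_matches_dietary_py recipe restrictions → Pre_matches_dietary_py recipe restrictions → Spec_matches_dietary_py recipe restrictions (matches_dietary_py recipe restrictions)
-- ===== LEMMAS AND PROOFS =====

theorem pv_veg_sub (f : String → Bool) (h : pvNonVeg.any f = true) : pvNonVegan.any f = true := by
  rcases List.any_eq_true.mp h with ⟨x, hxm, hxt⟩
  refine List.any_eq_true.mpr ⟨x, ?_, hxt⟩
  have he : pvNonVegan = pvNonVeg ++ pvVeganExtra := rfl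
  rw [he]
  exact List.mem_append_left _ hxm

-- A's loop returns false exactly when some restriction triggers a forbidden hit.
theorem pvLoopA_eq (text : String) (rs : List String) :
    pvLoopA text rs =
      !((rs.any (fun r => PySem.Str.lower r == "vegetarian") &&
          pvNonVeg.any (fun ing => PySem.Str.isIn ing text)) ||
        (rs.any (fun r => PySem.Str.lower r == "vegan") &&
          pvNonVegan.any (fun ing => PySem.Str.isIn ing text))) := by
  induction rs with
  | nil => simp [pvLoopA]
  | cons r rest ih =>
    simp only [pvLoopA, List.any_cons, ih]
    by_cases h1 : (PySem.Str.lower r == "vegetarian") = true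
    · have h2 : (PySem.Str.lower r == "vegan") = false := by
        have : PySem.Str.lower r = "vegetarian" := by simpa using h1
        simp [this]
      rw [if_pos h1, h1, h2]
      by_cases hA : pvNonVeg.any (fun ing => PySem.Str.isIn ing text) = true
      · rw [if_pos hA, hA, pv_veg_sub _ hA]; simp
      · rw [if_neg hA, eq_false_of_ne_true hA]; simp
    · rw [if_neg h1, eq_false_of_ne_true h1]
      by_cases h2 : (PySem.Str.lower r == "vegan") = true
      · rw [if_pos h2, h2]
        by_cases hB : pvNonVegan.any (fun ing => PySem.Str.isIn ing text) = true
        · rw [if_pos hB, hB]; simp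
        · rw [if_neg hB, eq_false_of_ne_true hB]; simp
      · rw [if_neg h2, eq_false_of_ne_true h2]; simp

-- membership in the lowered restrictions = a scan of the restrictions
theorem pv_contains_lowered (restrictions : List String) (v : String) :
    (restrictions.map PySem.Str.lower).contains v =
      restrictions.any (fun r => PySem.Str.lower r == v) := by
  induction restrictions with
  | nil => rfl
  | cons r rest ih =>
    rw [List.map_cons, List.contains_cons, List.any_cons, ih, BEq.comm]

-- a keyword not containing 'a' that is a prefix of l ++ a :: r is a prefix of l
theorem pv_prefix_split {a : Char} (kw : List Char) (ha : a ∉ kw) :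
    ∀ (l r : List Char), kw <+: l ++ a :: r → kw <+: l := by
  induction kw with
  | nil => intro l r _; exact List.nil_prefix
  | cons k kw' ih =>
    intro l r h
    cases l with
    | nil =>
      exfalso
      rcases List.cons_prefix_cons.mp h with ⟨hk, _⟩
      exact ha (hk ▸ List.mem_cons_self)
    | cons b l' =>
      rcases List.cons_prefix_cons.mp h with ⟨hk, htl⟩
      exact List.cons_prefix_cons.mpr ⟨hk, ih (fun hm => ha (List.mem_cons_of_mem _ hm)) l' r htl⟩

theorem pv_infix_iff_drop (kw x : List Char) : kw <:+: x ↔ ∃ j, kw <+: x.drop j := by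
  rw [← PySem.Chars.isIn_iff_infix, ← PySem.Chars.exists_prefix_drop_iff_isIn]

-- a keyword not containing 'a' sits inside l ++ a :: r iff inside l or inside r
theorem pv_infix_split {a : Char} (kw l r : List Char) (ha : a ∉ kw) :
    kw <:+: (l ++ a :: r) ↔ kw <:+: l ∨ kw <:+: r := by
  constructor
  · intro h
    rcases (pv_infix_iff_drop kw _).mp h with ⟨j, hj⟩
    by_cases hle : j ≤ l.length
    · rw [List.drop_append_of_le_length hle] at hj
      exact Or.inl ((pv_infix_iff_drop kw l).mpr ⟨j, pv_prefix_split kw ha _ _ hj⟩)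
    · obtain ⟨i, rfl⟩ : ∃ i, j = l.length + i := ⟨j - l.length, by omega⟩
      rw [List.drop_append] at hj
      have hj2 : kw <+: (a :: r).drop i := by
        have e1 : List.drop (l.length + i) l = [] := List.drop_eq_nil_of_le (by omega)
        have e2 : l.length + i - l.length = i := by omega
        rwa [e1, e2, List.nil_append] at hj
      cases i with
      | zero => omega
      | succ n =>
        rw [List.drop_succ_cons] at hj2
        exact Or.inr ((pv_infix_iff_drop kw r).mpr ⟨n, hj2⟩)
  · rintro (h | h)
    · exact h.trans ⟨[], a :: r, rfl⟩
    · exact h.trans ⟨l ++ [a], [], by simp⟩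

-- a nonempty space-free keyword occurs in ' '.join(parts) iff it occurs in some part
theorem pv_isIn_join (kw : List Char) (hne : kw ≠ []) (ha : (' ' : Char) ∉ kw) :
    ∀ ps : List (List Char),
      PySem.Chars.isIn kw (PySem.Chars.join [' '] ps) = ps.any (fun p => PySem.Chars.isIn kw p) := by
  intro ps
  induction ps with
  | nil =>
    simp only [List.any_nil]
    rw [PySem.Chars.isIn_eq_false_iff]
    intro h
    exact hne (List.eq_nil_of_infix_nil h)
  | cons p ps ih =>
    cases ps with
    | nil =>
      simp [PySem.Chars.join, List.intercalate]
    | cons q rest =>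
      rw [PySem.Chars.join_cons_cons]
      have hsplit : p ++ [' '] ++ PySem.Chars.join [' '] (q :: rest)
          = p ++ ' ' :: PySem.Chars.join [' '] (q :: rest) := by simp
      rw [hsplit, Bool.eq_iff_iff]
      rw [PySem.Chars.isIn_iff_infix, pv_infix_split kw p _ ha]
      rw [← PySem.Chars.isIn_iff_infix, ← PySem.Chars.isIn_iff_infix, ih]
      simp

-- lowercasing distributes over the space-join (lowerChar ' ' = ' ')
theorem pv_lower_join : ∀ ps : List (List Char),
    PySem.Chars.lower (PySem.Chars.join [' '] ps) = PySem.Chars.join [' '] (ps.map PySem.Chars.lower) := by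
  intro ps
  induction ps with
  | nil => rfl
  | cons p ps ih =>
    cases ps with
    | nil => simp [PySem.Chars.join_singleton]
    | cons q rest =>
      rw [PySem.Chars.join_cons_cons, List.map_cons, List.map_cons, PySem.Chars.join_cons_cons,
          ← List.map_cons, ← ih]
      simp [PySem.Chars.lower]
      decide

-- a fixed lowercase space-free keyword is in the lowered joined text iff in some lowered ingredient
theorem pv_kw_text (kw : String) (hne : kw.toList ≠ []) (ha : (' ' : Char) ∉ kw.toList)
    (ings : List String) :
    PySem.Str.isIn kw (PySem.Str.lower (PySem.Str.join " " ings)) =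
      ings.any (fun ing => PySem.Str.isIn kw (PySem.Str.lower ing)) := by
  simp only [PySem.Str.isIn_eq, PySem.Str.toList_lower, PySem.Str.toList_join]
  have hsep : (" " : String).toList = [' '] := rfl
  rw [hsep, pv_lower_join, pv_isIn_join kw.toList hne ha, List.map_map, List.any_map]
  rfl

-- B's per-ingredient check equals the negated scan of A's joined lowered text
theorem pv_checkEach_eq (F : List String)
    (hF : ∀ kw ∈ F, kw.toList ≠ [] ∧ (' ' : Char) ∉ kw.toList) (ings : List String) :
    pvCheckEach F ings =
      ! F.any (fun kw => PySem.Str.isIn kw (PySem.Str.lower (PySem.Str.join " " ings))) := by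
  unfold pvCheckEach
  rw [Bool.eq_iff_iff, List.all_eq_true, Bool.not_eq_true', List.any_eq_false]
  constructor
  · intro h kw hkw
    rw [pv_kw_text kw (hF kw hkw).1 (hF kw hkw).2]
    intro hbad
    rcases List.any_eq_true.mp hbad with ⟨ing, hing, hIn⟩
    have hthis := List.all_eq_true.mp (h ing hing) kw hkw
    rw [Bool.not_eq_true', hIn] at hthis
    exact Bool.noConfusion hthis
  · intro h ing hing
    rw [List.all_eq_true]
    intro kw hkw
    have hkwt := h kw hkw
    rw [pv_kw_text kw (hF kw hkw).1 (hF kw hkw).2] at hkwt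
    have hf : PySem.Str.isIn kw (PySem.Str.lower ing) = false := by
      cases hI : PySem.Str.isIn kw (PySem.Str.lower ing)
      · rfl
      · exact absurd (List.any_eq_true.mpr ⟨ing, hing, hI⟩) hkwt
    rw [Bool.not_eq_true']
    exact hf

-- the two keyword lists satisfy the side conditions
theorem pv_hF_vegan : ∀ kw ∈ pvNonVeg ++ pvVeganExtra, kw.toList ≠ [] ∧ (' ' : Char) ∉ kw.toList := by decide
theorem pv_hF_veg : ∀ kw ∈ pvNonVeg, kw.toList ≠ [] ∧ (' ' : Char) ∉ kw.toList := by decide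

-- 'meat' … 'fish' is contained in the vegan list, so the vegetarian hit is absorbed
theorem pv_or_absorb (f : String → Bool) : (pvNonVeg.any f || pvNonVegan.any f) = pvNonVegan.any f := by
  cases hA : pvNonVeg.any f
  · simp
  · rw [pv_veg_sub f hA]; rfl

-- ===== VERDICT (by name: the statement is the Claim_ definition above) =====
theorem matches_dietary_py_spec : Claim_equal_matches_dietary_py := by
  intro recipe restrictions _ _
  show matches_dietary_py recipe restrictions = matches_dietary_py_alt recipe restrictions
  simp only [matches_dietary_py, matches_dietary_py_alt]
  rw [pvLoopA_eq, pv_contains_lowered, pv_contains_lowered,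
      pv_checkEach_eq _ pv_hF_vegan, pv_checkEach_eq _ pv_hF_veg]
  have hcat : pvNonVeg ++ pvVeganExtra = pvNonVegan := rfl
  rw [hcat]
  by_cases h2 : restrictions.any (fun r => PySem.Str.lower r == "vegan") = true
  · rw [if_pos h2, h2]
    by_cases h1 : restrictions.any (fun r => PySem.Str.lower r == "vegetarian") = true
    · rw [h1]
      simp only [Bool.true_and, pv_or_absorb]
    · rw [eq_false_of_ne_true h1]; simp
  · rw [if_neg h2, eq_false_of_ne_true h2]
    by_cases h1 : restrictions.any (fun r => PySem.Str.lower r == "vegetarian") = true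
    · rw [if_pos h1, h1]; simp
    · rw [if_neg h1, eq_false_of_ne_true h1]; simp
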